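-- pv_equiv track=rewrite | github.com/timleung22/AOC2017 | day24.py | longestPaths
-- ===== SOURCE A (Python) =====
-- def longestPaths(paths):
--     longest = 0
--     longestPaths = []
--     for eachPath in paths:
--         if len(eachPath) > longest:
--             longestPaths = [eachPath]
--             longest = len(eachPath)
--         elif len(eachPath) == longest:
--             longestPaths.append(eachPath)
--     return longestPaths
-- ===== SOURCE B (Python) =====
-- def longestPaths(paths):
--     maxlen = max((len(p) for p in paths), default=0)
--     return [p for p in paths if len(p) == maxlen]
-- ===== Notes on version B (the rewrite author's own statement) =====
-- stated objective: simpler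
-- what changed: Replaces the running-max-with-reset accumulator by a two-pass compute-then-filter: first the maximum path length (default 0), then an order-preserving filter.
import Mathlib
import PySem

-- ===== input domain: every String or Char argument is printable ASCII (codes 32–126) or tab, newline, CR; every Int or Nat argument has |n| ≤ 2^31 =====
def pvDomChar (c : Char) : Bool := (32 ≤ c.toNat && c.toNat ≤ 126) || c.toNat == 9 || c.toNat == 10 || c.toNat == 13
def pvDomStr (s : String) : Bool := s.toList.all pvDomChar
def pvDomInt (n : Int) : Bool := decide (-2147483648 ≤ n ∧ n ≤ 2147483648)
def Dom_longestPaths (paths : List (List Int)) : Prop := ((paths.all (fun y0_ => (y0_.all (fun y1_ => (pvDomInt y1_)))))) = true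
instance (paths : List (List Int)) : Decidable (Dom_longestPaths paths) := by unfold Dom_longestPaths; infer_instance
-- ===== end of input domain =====

-- B replaces A's running-max-with-reset accumulation by a two-pass compute-then-filter decomposition (simpler; same O(n) cost).

-- ===== PORT A =====
-- A's loop carries (longest, longestPaths); reset on '>', append on '=='.
def longestPathsStep (st : Int × List (List Int)) (eachPath : List Int) : Int × List (List Int) :=
  if (eachPath.length : Int) > st.1 then ((eachPath.length : Int), [eachPath])
  else if (eachPath.length : Int) = st.1 then (st.1, st.2 ++ [eachPath])
  else st

def longestPaths (paths : List (List Int)) : List (List Int) :=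
  (paths.foldl longestPathsStep (0, [])).2

-- ===== PORT B =====
-- maxlen = max((len(p) for p in paths), default=0)
def longestPaths_alt (paths : List (List Int)) : List (List Int) :=
  let maxlen : Int := paths.foldl (fun m p => max m (p.length : Int)) 0
  paths.filter (fun p => (p.length : Int) == maxlen)

-- ===== PRECONDITION & SPEC =====
def Spec_longestPaths (paths : List (List Int)) (out : List (List Int)) : Prop := out = longestPaths_alt paths
instance (paths : List (List Int)) (out : List (List Int)) : Decidable (Spec_longestPaths paths out) := by unfold Spec_longestPaths; infer_instance

-- ===== CLAIM (what is proved, stated in full; the proofs are below) =====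
def Claim_equal_longestPaths : Prop := ∀ (paths : List (List Int)), Dom_longestPaths paths → Spec_longestPaths paths (longestPaths paths)

-- ===== LEMMAS AND PROOFS =====

theorem le_foldl_max (l : List (List Int)) (m : Int) :
    m ≤ l.foldl (fun a p => max a (p.length : Int)) m := by
  induction l generalizing m with
  | nil => simp
  | cons p l ih => exact le_trans (le_max_left _ _) (ih (max m p.length))

theorem foldl_invariant (l : List (List Int)) (m : Int) (acc : List (List Int)) :
    (l.foldl longestPathsStep (m, acc)).2 =
      (if m = l.foldl (fun a p => max a (p.length : Int)) m then acc else [])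
        ++ l.filter (fun p => (p.length : Int) == l.foldl (fun a p => max a (p.length : Int)) m) := by
  induction l generalizing m acc with
  | nil => simp
  | cons p l ih =>
    simp only [List.foldl_cons, List.filter_cons]
    by_cases h1 : (p.length : Int) > m
    · have hmax : max m (p.length : Int) = (p.length : Int) := max_eq_right (le_of_lt h1)
      rw [show longestPathsStep (m, acc) p = ((p.length : Int), [p]) by
        simp [longestPathsStep, h1]]
      rw [ih]
      simp only [hmax]
      have hM := le_foldl_max l ((p.length : Int))
      have hne : ¬ (m = l.foldl (fun a p => max a (p.length : Int)) (p.length : Int)) := by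
        intro he; omega
      rw [if_neg hne]
      by_cases h2 : (p.length : Int) = l.foldl (fun a p => max a (p.length : Int)) (p.length : Int)
      · have hb : ((p.length : Int) == l.foldl (fun a p => max a (p.length : Int)) (p.length : Int)) = true := by
          exact beq_iff_eq.mpr h2
        rw [if_pos h2, hb]
        simp
      · have hb : ((p.length : Int) == l.foldl (fun a p => max a (p.length : Int)) (p.length : Int)) = false := by
          simp [h2]
        rw [if_neg h2, hb]
        simp
    · by_cases h2 : (p.length : Int) = m
      · have hmax : max m (p.length : Int) = m := max_eq_left (by omega)
        rw [show longestPathsStep (m, acc) p = (m, acc ++ [p]) by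
          simp [longestPathsStep, h2]]
        rw [ih]
        simp only [hmax]
        by_cases h3 : m = l.foldl (fun a p => max a (p.length : Int)) m
        · rw [if_pos h3, if_pos h3]
          have : ((p.length : Int) == l.foldl (fun a p => max a (p.length : Int)) m) = true := by
            simp [h2, ← h3]
          simp [this]
        · rw [if_neg h3, if_neg h3]
          have : ((p.length : Int) == l.foldl (fun a p => max a (p.length : Int)) m) = false := by
            simp; omega
          simp [this]
      · have hmax : max m (p.length : Int) = m := max_eq_left (by omega)
        rw [show longestPathsStep (m, acc) p = (m, acc) by
          simp [longestPathsStep, h1, h2]]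
        rw [ih]
        simp only [hmax]
        have hM := le_foldl_max l m
        have : ((p.length : Int) == l.foldl (fun a p => max a (p.length : Int)) m) = false := by
          simp; omega
        simp [this]

-- ===== VERDICT (by name: the statement is the Claim_ definition above) =====
theorem longestPaths_spec : Claim_equal_longestPaths := by
  intro paths _
  unfold Spec_longestPaths longestPaths longestPaths_alt
  rw [foldl_invariant]
  split <;> simp
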